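-- pv_equiv track=rewrite | github.com/muhammedbyrm/Optimized-BlackJack | main.py | BJ
-- ===== SOURCE A (Python) =====
-- def BJ(deck, i):
--     options = []
--
--     if len(deck) - i < 4:
--         return 0
--
--     for p in range(2, len(deck) - i - 1):
--         hand = deal(deck, i)
--         dealer = deal(deck, i + 1)
--         if len(deck[i + 4:i + p + 2]) > 0:
--             hand += deck[i + 4:i + p + 2]
--
--         if earning(hand) > 21:
--             options.append(-1 + BJ(deck, i + p + 2))  # bust
--             break
--         d = 0
--         for d in range(2, len(deck) - i - p):
--             if len(deck[i + p + 2:i + p + d]) > 0: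
--                 dealer += deck[i + p + 2:i + p + d]
--             if earning(dealer) >= 17:
--                 break
--         if earning(dealer) > 21:  # dealer bust
--             dealer = []
--         options.append((compare(earning(hand), earning(dealer)) + BJ(deck, i + p + d)))
--
--     return max(options)
--
-- def compare(a, b):
--     if a > b:
--         return 1
--     elif b > a:
--         return -1
--     else:
--         return 0
--
-- def deal(deck, i):
--     cards = [deck[i] % 13, deck[i + 1] % 13]
--     return cards
--
-- def earning(hand):
--     total = 0
--     for each in hand:
--         if each == 0:
--             if total + 11 <= 21:
--                 total += 11
--             else:
--                 total += 1
--
--         elif each == 10: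
--             total += 10
--
--         elif each == 11:
--             total += 10
--
--         elif each == 12:
--             total += 10
--         else:
--             total += each
--
--     return total
-- ===== SOURCE B (Python) =====
-- def BJ(deck, i):
--     # Bottom-up DP on the start index: A's recursion at index j depends only on
--     # larger indices, so one table of size n replaces the exponential recursion.
--     # Hand/dealer totals are maintained incrementally instead of re-slicing and
--     # re-summing lists each iteration.
--     n = len(deck)
--     if n - i < 4:
--         return 0
--
--     def add(total, c):
--         if c == 0:
--             return total + (11 if total + 11 <= 21 else 1)
--         if c in (10, 11, 12):
--             return total + 10
--         return total + c
--
--     memo = {}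
--
--     def val(j):
--         return memo.get(j, 0)
--
--     for j in range(n - 4, i - 1, -1):
--         opts = []
--         h = add(add(0, deck[j] % 13), deck[j + 1] % 13)
--         for p in range(2, n - j - 1):
--             if p > 2:
--                 h = add(h, deck[j + p + 1])
--             if h > 21:
--                 opts.append(-1 + val(j + p + 2))
--                 break
--             de = add(add(0, deck[j + 1] % 13), deck[j + 2] % 13)
--             dlast = 0
--             for d in range(2, n - j - p):
--                 dlast = d
--                 for k in range(j + p + 2, j + p + d):
--                     de = add(de, deck[k])
--                 if de >= 17:
--                     break
--             if de > 21:
--                 de = 0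
--             opts.append((1 if h > de else -1 if de > h else 0) + val(j + p + dlast))
--         memo[j] = max(opts)
--     return memo[i]
-- ===== Notes on version B (the rewrite author's own statement) =====
-- stated objective: faster
-- what changed: Replaces A's exponential top-down recursion by a bottom-up dynamic-programming table indexed by the start position (the result depends only on the index), and maintains hand/dealer totals incrementally instead of rebuilding card lists with slices and re-summing them with earning().
-- outside the precondition, e.g. on BJ([18, 10, 7, 16, 53, 48], -5): A returns 2, B returns 0
import Mathlib
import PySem

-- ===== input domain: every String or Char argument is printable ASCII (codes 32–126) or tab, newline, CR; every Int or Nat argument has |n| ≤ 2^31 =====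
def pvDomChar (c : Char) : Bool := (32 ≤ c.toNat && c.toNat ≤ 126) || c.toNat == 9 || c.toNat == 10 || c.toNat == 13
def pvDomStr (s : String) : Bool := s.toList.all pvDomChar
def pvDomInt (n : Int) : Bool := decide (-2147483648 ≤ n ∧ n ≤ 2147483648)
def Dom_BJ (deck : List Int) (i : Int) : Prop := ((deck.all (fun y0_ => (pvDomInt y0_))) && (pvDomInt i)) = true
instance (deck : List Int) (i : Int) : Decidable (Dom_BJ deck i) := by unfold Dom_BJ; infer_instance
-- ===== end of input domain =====

-- B replaces A's exponential recursion by a bottom-up DP table on the start index with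
-- incremental hand/dealer totals (objective: faster).

-- ===== PORT A =====

def pyCompare (a b : Int) : Int :=
  if a > b then 1 else if b > a then -1 else 0

-- deck[i] raises IndexError outside range; such inputs are outside Pre_BJ, so .getD 0 is unreachable there
def deal (deck : List Int) (i : Int) : List Int :=
  [PySem.Int.mod ((PySem.List.pyGet? deck i).getD 0) 13,
   PySem.Int.mod ((PySem.List.pyGet? deck (i + 1)).getD 0) 13]

def earnStep (total each : Int) : Int :=
  if each = 0 then (if total + 11 ≤ 21 then total + 11 else total + 1)
  else if each = 10 then total + 10
  else if each = 11 then total + 10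
  else if each = 12 then total + 10
  else total + each

def earning (hand : List Int) : Int := hand.foldl earnStep 0

-- the inner 'for d in range(2, len(deck)-i-p)' loop of A, with its break flag; state = (dealer, d, broken)
def dealerRun (deck : List Int) (i p : Int) (dealer0 : List Int) : List Int × Int × Bool :=
  (PySem.List.pyRange 2 (PySem.List.len deck - i - p) 1).foldl
    (fun st d =>
      if st.2.2 then st
      else
        let dealer := if 0 < (PySem.List.slice deck (some (i + p + 2)) (some (i + p + d))).length
                      then st.1 ++ PySem.List.slice deck (some (i + p + 2)) (some (i + p + d))
                      else st.1
        if earning dealer ≥ 17 then (dealer, d, true) else (dealer, d, false))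
    (dealer0, 0, false)

def BJ_go (deck : List Int) : Nat → Int → Int
  | 0, _ => 0      -- fuel guard only (the initial fuel below always suffices; see BJ_go_fuel)
  | fuel + 1, i =>
    if PySem.List.len deck - i < 4 then 0
    else
      let res := (PySem.List.pyRange 2 (PySem.List.len deck - i - 1) 1).foldl
        (fun (st : List Int × Bool) p =>
          if st.2 then st
          else
            let hand0 := deal deck i
            let dealer0 := deal deck (i + 1)
            let hand := if 0 < (PySem.List.slice deck (some (i + 4)) (some (i + p + 2))).length
                        then hand0 ++ PySem.List.slice deck (some (i + 4)) (some (i + p + 2))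
                        else hand0
            if earning hand > 21 then (st.1 ++ [-1 + BJ_go deck fuel (i + p + 2)], true)
            else
              let dl := dealerRun deck i p dealer0
              let dealer := if earning dl.1 > 21 then ([] : List Int) else dl.1
              (st.1 ++ [pyCompare (earning hand) (earning dealer) + BJ_go deck fuel (i + p + dl.2.1)], false))
        ([], false)
      (PySem.List.max? res.1 (fun x => x)).getD 0

def BJ (deck : List Int) (i : Int) : Int := BJ_go deck (PySem.List.len deck - i).toNat i

-- ===== PORT B =====

def addCard (total c : Int) : Int :=
  if c = 0 then (if total + 11 ≤ 21 then total + 11 else total + 1)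
  else if c = 10 ∨ c = 11 ∨ c = 12 then total + 10
  else total + c

-- Source B's deck[k]; where Python would raise the input is outside Pre_BJ
def getCard (deck : List Int) (k : Int) : Int := (PySem.List.pyGet? deck k).getD 0

-- one row of the DP table: the body of Source B's 'for j' loop, with 'val' the memo lookup
def rowBJ (deck : List Int) (val : Int → Int) (j : Int) : Int :=
  let n := PySem.List.len deck
  let st := (PySem.List.pyRange 2 (n - j - 1) 1).foldl
    (fun (st : List Int × Int × Bool) p =>
      if st.2.2 then st
      else
        let h := if 2 < p then addCard st.2.1 (getCard deck (j + p + 1)) else st.2.1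
        if h > 21 then (st.1 ++ [-1 + val (j + p + 2)], h, true)
        else
          let dst := (PySem.List.pyRange 2 (n - j - p) 1).foldl
            (fun (ds : Int × Int × Bool) d =>
              if ds.2.2 then ds
              else
                let de := (PySem.List.pyRange (j + p + 2) (j + p + d) 1).foldl
                  (fun t k => addCard t (getCard deck k)) ds.1
                if de ≥ 17 then (de, d, true) else (de, d, false))
            (addCard (addCard 0 (PySem.Int.mod (getCard deck (j + 1)) 13))
               (PySem.Int.mod (getCard deck (j + 2)) 13), 0, false)
          let de := if dst.1 > 21 then 0 else dst.1
          (st.1 ++ [(if h > de then 1 else if de > h then -1 else 0) + val (j + p + dst.2.1)], h, false))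
    ([], addCard (addCard 0 (PySem.Int.mod (getCard deck j) 13))
       (PySem.Int.mod (getCard deck (j + 1)) 13), false)
  (PySem.List.max? st.1 (fun x => x)).getD 0

def BJ_alt (deck : List Int) (i : Int) : Int :=
  if PySem.List.len deck - i < 4 then 0
  else
    let memo := (PySem.List.pyRange (PySem.List.len deck - 4) (i - 1) (-1)).foldl
      (fun (m : PySem.Dict Int Int) j => m.insert j (rowBJ deck (fun k => m.getD k 0) j))
      PySem.Dict.empty
    -- Source B returns memo[i]; the key i is present for every 0 ≤ i (Pre_BJ), so .getD 0 is unreachable there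
    (memo.get? i).getD 0

-- ===== PRECONDITION & SPEC =====
-- Pre_ excludes negative start indices i: there A reads cards through Python's accidental
-- negative-index/slice wraparound (and raises IndexError for i < -len(deck)); B's table is
-- indexed by genuine deck positions and returns a different value on that corner.
def Pre_BJ (deck : List Int) (i : Int) : Prop := 0 ≤ i
instance (deck : List Int) (i : Int) : Decidable (Pre_BJ deck i) := by unfold Pre_BJ; infer_instance

def pvWitness_BJ : List Int × Int := ([1, 9, 0, 12, 5, 23], 0)

def Spec_BJ (deck : List Int) (i : Int) (out : Int) : Prop := out = BJ_alt deck i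
instance (deck : List Int) (i : Int) (out : Int) : Decidable (Spec_BJ deck i out) := by unfold Spec_BJ; infer_instance

-- ===== CLAIM (what is proved, stated in full; the proofs are below) =====
def Claim_equal_BJ : Prop := ∀ (deck : List Int) (i : Int), Dom_BJ deck i → Pre_BJ deck i → Spec_BJ deck i (BJ deck i)

-- ===== LEMMAS AND PROOFS =====

-- named copies of the loop bodies of the two ports (proof-layer only)
def stepAf (deck : List Int) (i : Int) (f : Int → Int) : (List Int × Bool) → Int → (List Int × Bool) :=
  fun st p =>
    if st.2 then st
    else
      let hand0 := deal deck i
      let dealer0 := deal deck (i + 1)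
      let hand := if 0 < (PySem.List.slice deck (some (i + 4)) (some (i + p + 2))).length
                  then hand0 ++ PySem.List.slice deck (some (i + 4)) (some (i + p + 2))
                  else hand0
      if earning hand > 21 then (st.1 ++ [-1 + f (i + p + 2)], true)
      else
        let dl := dealerRun deck i p dealer0
        let dealer := if earning dl.1 > 21 then ([] : List Int) else dl.1
        (st.1 ++ [pyCompare (earning hand) (earning dealer) + f (i + p + dl.2.1)], false)

-- the final d of A's inner dealer loop is ≥ 0
theorem dealerRun_d_nonneg (deck : List Int) (i p : Int) (dealer0 : List Int) :
    0 ≤ (dealerRun deck i p dealer0).2.1 := by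
  unfold dealerRun
  have main : ∀ (l : List Int) (st : List Int × Int × Bool), (∀ x ∈ l, 0 ≤ x) → 0 ≤ st.2.1 →
      0 ≤ (l.foldl (fun st d =>
        if st.2.2 then st
        else
          let dealer := if 0 < (PySem.List.slice deck (some (i + p + 2)) (some (i + p + d))).length
                        then st.1 ++ PySem.List.slice deck (some (i + p + 2)) (some (i + p + d))
                        else st.1
          if earning dealer ≥ 17 then (dealer, d, true) else (dealer, d, false)) st).2.1 := by
    intro l
    induction l with
    | nil => intro st _ h; simpa using h
    | cons x xs ih =>
      intro st hl hst
      simp only [List.foldl_cons]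
      apply ih _ (fun y hy => hl y (by simp [hy]))
      have hx : 0 ≤ x := hl x (by simp)
      split
      · exact hst
      · split <;> split <;> simpa using hx
  apply main
  · intro x hx
    have := (PySem.List.mem_pyRange_one).1 hx
    omega
  · simp

theorem BJ_go_succ (deck : List Int) (fuel : Nat) (i : Int) :
    BJ_go deck (fuel + 1) i =
      if PySem.List.len deck - i < 4 then 0
      else
        (PySem.List.max?
          ((PySem.List.pyRange 2 (PySem.List.len deck - i - 1) 1).foldl
            (stepAf deck i (BJ_go deck fuel)) ([], false)).1
          (fun x => x)).getD 0 := rfl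

theorem stepAf_congr (deck : List Int) (i : Int) (f g : Int → Int)
    (hfg : ∀ k, i + 2 ≤ k → f k = g k) :
    ∀ p ∈ PySem.List.pyRange 2 (PySem.List.len deck - i - 1) 1,
      ∀ (st : List Int × Bool), stepAf deck i f st p = stepAf deck i g st p := by
  intro p hp st
  have hpb := (PySem.List.mem_pyRange_one).1 hp
  unfold stepAf
  dsimp only
  by_cases hfr : st.2
  · rw [if_pos hfr, if_pos hfr]
  · rw [if_neg hfr, if_neg hfr]
    by_cases hbust : earning (if 0 < (PySem.List.slice deck (some (i + 4)) (some (i + p + 2))).length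
        then deal deck i ++ PySem.List.slice deck (some (i + 4)) (some (i + p + 2))
        else deal deck i) > 21
    · rw [if_pos hbust, if_pos hbust, hfg (i + p + 2) (by omega)]
    · rw [if_neg hbust, if_neg hbust]
      have hd := dealerRun_d_nonneg deck i p (deal deck (i + 1))
      rw [hfg (i + p + (dealerRun deck i p (deal deck (i + 1))).2.1) (by omega)]

theorem BJ_go_fuel (deck : List Int) :
    ∀ (n m : Nat) (i : Int), (PySem.List.len deck - i).toNat ≤ n →
      (PySem.List.len deck - i).toNat ≤ m → BJ_go deck n i = BJ_go deck m i := by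
  intro n
  induction n with
  | zero =>
    intro m i h1 h2
    cases m with
    | zero => rfl
    | succ m' =>
      rw [BJ_go_succ, if_pos (by simp only [PySem.List.len_eq] at *; omega)]
      rfl
  | succ n ih =>
    intro m i h1 h2
    cases m with
    | zero =>
      rw [BJ_go_succ, if_pos (by simp only [PySem.List.len_eq] at *; omega)]
      rfl
    | succ m' =>
      rw [BJ_go_succ, BJ_go_succ]
      by_cases hg : PySem.List.len deck - i < 4
      · rw [if_pos hg, if_pos hg]
      · rw [if_neg hg, if_neg hg]
        rw [PySem.List.foldl_congr_mem' _ _ _ _ (stepAf_congr deck i (BJ_go deck n) (BJ_go deck m')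
          (fun k hk => ih m' k (by simp only [PySem.List.len_eq] at *; omega)
            (by simp only [PySem.List.len_eq] at *; omega)))]

def dstepA (deck : List Int) (i p : Int) : (List Int × Int × Bool) → Int → (List Int × Int × Bool) :=
  fun st d =>
    if st.2.2 then st
    else
      let dealer := if 0 < (PySem.List.slice deck (some (i + p + 2)) (some (i + p + d))).length
                    then st.1 ++ PySem.List.slice deck (some (i + p + 2)) (some (i + p + d))
                    else st.1
      if earning dealer ≥ 17 then (dealer, d, true) else (dealer, d, false)

def dstepB (deck : List Int) (j p : Int) : (Int × Int × Bool) → Int → (Int × Int × Bool) :=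
  fun ds d =>
    if ds.2.2 then ds
    else
      let de := (PySem.List.pyRange (j + p + 2) (j + p + d) 1).foldl
        (fun t k => addCard t (getCard deck k)) ds.1
      if de ≥ 17 then (de, d, true) else (de, d, false)

def ostepB (deck : List Int) (val : Int → Int) (j : Int) :
    (List Int × Int × Bool) → Int → (List Int × Int × Bool) :=
  fun st p =>
    if st.2.2 then st
    else
      let h := if 2 < p then addCard st.2.1 (getCard deck (j + p + 1)) else st.2.1
      if h > 21 then (st.1 ++ [-1 + val (j + p + 2)], h, true)
      else
        let dst := (PySem.List.pyRange 2 (PySem.List.len deck - j - p) 1).foldl (dstepB deck j p)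
          (addCard (addCard 0 (PySem.Int.mod (getCard deck (j + 1)) 13))
             (PySem.Int.mod (getCard deck (j + 2)) 13), 0, false)
        let de := if dst.1 > 21 then 0 else dst.1
        (st.1 ++ [(if h > de then 1 else if de > h then -1 else 0) + val (j + p + dst.2.1)], h, false)

theorem dealerRun_eq (deck : List Int) (i p : Int) (d0 : List Int) :
    dealerRun deck i p d0 =
      (PySem.List.pyRange 2 (PySem.List.len deck - i - p) 1).foldl (dstepA deck i p) (d0, 0, false) := rfl

theorem BJ_unfold (deck : List Int) (i : Int) (h : ¬ PySem.List.len deck - i < 4) :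
    BJ deck i =
      (PySem.List.max?
        ((PySem.List.pyRange 2 (PySem.List.len deck - i - 1) 1).foldl
          (stepAf deck i (fun k => BJ deck k)) ([], false)).1
        (fun x => x)).getD 0 := by
  obtain ⟨n, hn⟩ : ∃ n, (PySem.List.len deck - i).toNat = n + 1 := by
    refine ⟨(PySem.List.len deck - i).toNat - 1, ?_⟩
    simp only [PySem.List.len_eq] at *
    omega
  rw [show BJ deck i = BJ_go deck (PySem.List.len deck - i).toNat i from rfl, hn, BJ_go_succ,
      if_neg h]
  rw [PySem.List.foldl_congr_mem' _ _ _ _ (stepAf_congr deck i (BJ_go deck n) (fun k => BJ deck k)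
    (fun k hk => BJ_go_fuel deck n ((PySem.List.len deck - k).toNat) k
      (by simp only [PySem.List.len_eq] at *; omega) (le_refl _)))]

theorem rowBJ_eq (deck : List Int) (val : Int → Int) (j : Int) :
    rowBJ deck val j =
      (PySem.List.max?
        ((PySem.List.pyRange 2 (PySem.List.len deck - j - 1) 1).foldl (ostepB deck val j)
          ([], addCard (addCard 0 (PySem.Int.mod (getCard deck j) 13))
             (PySem.Int.mod (getCard deck (j + 1)) 13), false)).1
        (fun x => x)).getD 0 := rfl

theorem earnStep_eq_addCard : earnStep = addCard := by
  funext t c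
  unfold earnStep addCard
  split_ifs <;> first | rfl | omega

theorem earning_eq_foldl (l : List Int) : earning l = l.foldl addCard 0 := by
  simp [earning, earnStep_eq_addCard]

theorem earning_append (l m : List Int) :
    earning (l ++ m) = m.foldl addCard (earning l) := by
  simp [earning_eq_foldl, List.foldl_append]

theorem earning_pair (c1 c2 : Int) : earning [c1, c2] = addCard (addCard 0 c1) c2 := by
  simp [earning_eq_foldl]

theorem earning_deal (deck : List Int) (i : Int) :
    earning (deal deck i) =
      addCard (addCard 0 (PySem.Int.mod (getCard deck i) 13))
        (PySem.Int.mod (getCard deck (i + 1)) 13) := by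
  simp [deal, earning_pair, getCard]

-- a slice with in-range bounds is the list of its cards by index
theorem slice_eq_map (deck : List Int) (a b : Int) (ha : 0 ≤ a) (hab : a ≤ b)
    (hb : b ≤ (deck.length : Int)) :
    PySem.List.slice deck (some a) (some b) = (PySem.List.pyRange a b 1).map (getCard deck) := by
  suffices H : ∀ (k : Nat) (a : Int), 0 ≤ a → a ≤ b → (b - a).toNat = k →
      PySem.List.slice deck (some a) (some b) = (PySem.List.pyRange a b 1).map (getCard deck) from
    H (b - a).toNat a ha hab rfl
  intro k
  induction k with
  | zero =>
    intro a ha hab h0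
    have hba : b = a := by omega
    subst hba
    rw [PySem.List.slice_toNat deck ha ha, PySem.List.pyRange_one_eq_nil (le_refl b)]
    simp
  | succ k ih =>
    intro a ha hab h0
    have hlt : a < b := by omega
    rw [PySem.List.pyRange_one_cons hlt, List.map_cons]
    rw [PySem.List.slice_toNat deck ha (by omega)]
    have halen : a.toNat < deck.length := by omega
    rw [List.drop_eq_getElem_cons halen]
    have htn : b.toNat - a.toNat = (b.toNat - (a + 1).toNat) + 1 := by omega
    rw [htn, List.take_succ_cons]
    congr 1
    · simp only [getCard]
      rw [PySem.List.pyGet?_of_nonneg deck ha, List.getElem?_eq_getElem halen]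
      rfl
    · have hrec := ih (a + 1) (by omega) (by omega) (by omega)
      rw [PySem.List.slice_toNat deck (by omega) (by omega)] at hrec
      have hdr : (a + 1).toNat = a.toNat + 1 := by omega
      rw [hdr] at hrec
      rw [show b.toNat - (a + 1).toNat = b.toNat - (a.toNat + 1) from by omega]
      exact hrec

-- B's running hand total, as the fold it maintains
def handT (deck : List Int) (j p : Int) : Int :=
  (PySem.List.pyRange (j + 4) (j + p + 2) 1).foldl (fun t k => addCard t (getCard deck k))
    (addCard (addCard 0 (PySem.Int.mod (getCard deck j) 13))
       (PySem.Int.mod (getCard deck (j + 1)) 13))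

theorem handT_two (deck : List Int) (j : Int) :
    handT deck j 2 =
      addCard (addCard 0 (PySem.Int.mod (getCard deck j) 13))
        (PySem.Int.mod (getCard deck (j + 1)) 13) := by
  unfold handT
  rw [show j + 2 + 2 = j + 4 by ring, PySem.List.pyRange_one_eq_nil (le_refl _)]
  rfl

theorem handT_succ (deck : List Int) (j p : Int) (hp : 3 ≤ p) :
    handT deck j p = addCard (handT deck j (p - 1)) (getCard deck (j + p + 1)) := by
  unfold handT
  rw [show j + (p - 1) + 2 = j + p + 1 by ring]
  rw [show j + p + 2 = (j + p + 1) + 1 by ring,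
      PySem.List.pyRange_one_succ_right (by omega), List.foldl_append]
  simp only [List.foldl_cons, List.foldl_nil]

theorem handT_eq_earning (deck : List Int) (j p : Int) (hj : 0 ≤ j) (hp : 2 ≤ p)
    (hn : j + p + 2 ≤ (deck.length : Int)) :
    handT deck j p =
      earning (if 0 < (PySem.List.slice deck (some (j + 4)) (some (j + p + 2))).length
               then deal deck j ++ PySem.List.slice deck (some (j + 4)) (some (j + p + 2))
               else deal deck j) := by
  have hif : (if 0 < (PySem.List.slice deck (some (j + 4)) (some (j + p + 2))).length
               then deal deck j ++ PySem.List.slice deck (some (j + 4)) (some (j + p + 2))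
               else deal deck j)
      = deal deck j ++ PySem.List.slice deck (some (j + 4)) (some (j + p + 2)) := by
    split
    · rfl
    · have hnil : PySem.List.slice deck (some (j + 4)) (some (j + p + 2)) = [] := by
        apply List.eq_nil_of_length_eq_zero; omega
      simp [hnil]
  rw [hif, earning_append, slice_eq_map deck (j + 4) (j + p + 2) (by omega) (by omega) hn,
      List.foldl_map, earning_deal]
  rfl

-- frozen folds: once a break flag is set every later iteration is a no-op
theorem foldl_frozen_stepAf (deck : List Int) (i : Int) (f : Int → Int) :
    ∀ (l : List Int) (st : List Int × Bool), st.2 = true → l.foldl (stepAf deck i f) st = st := by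
  intro l
  induction l with
  | nil => intro st _; rfl
  | cons x xs ih =>
    intro st h
    simp only [List.foldl_cons]
    rw [show stepAf deck i f st x = st by unfold stepAf; rw [if_pos h]]
    exact ih st h

theorem foldl_frozen_ostepB (deck : List Int) (val : Int → Int) (j : Int) :
    ∀ (l : List Int) (st : List Int × Int × Bool), st.2.2 = true →
      l.foldl (ostepB deck val j) st = st := by
  intro l
  induction l with
  | nil => intro st _; rfl
  | cons x xs ih =>
    intro st h
    simp only [List.foldl_cons]
    rw [show ostepB deck val j st x = st by unfold ostepB; rw [if_pos h]]
    exact ih st h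

theorem foldl_frozen_dstepA (deck : List Int) (i p : Int) :
    ∀ (l : List Int) (st : List Int × Int × Bool), st.2.2 = true →
      l.foldl (dstepA deck i p) st = st := by
  intro l
  induction l with
  | nil => intro st _; rfl
  | cons x xs ih =>
    intro st h
    simp only [List.foldl_cons]
    rw [show dstepA deck i p st x = st by unfold dstepA; rw [if_pos h]]
    exact ih st h

theorem foldl_frozen_dstepB (deck : List Int) (j p : Int) :
    ∀ (l : List Int) (st : Int × Int × Bool), st.2.2 = true →
      l.foldl (dstepB deck j p) st = st := by
  intro l
  induction l with
  | nil => intro st _; rfl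
  | cons x xs ih =>
    intro st h
    simp only [List.foldl_cons]
    rw [show dstepB deck j p st x = st by unfold dstepB; rw [if_pos h]]
    exact ih st h

-- the final d of B's dealer loop is ≥ 0
theorem dstepB_d_nonneg (deck : List Int) (j p : Int) :
    ∀ (l : List Int) (st : Int × Int × Bool), (∀ x ∈ l, 0 ≤ x) → 0 ≤ st.2.1 →
      0 ≤ (l.foldl (dstepB deck j p) st).2.1 := by
  intro l
  induction l with
  | nil => intro st _ h; simpa using h
  | cons x xs ih =>
    intro st hl hst
    simp only [List.foldl_cons]
    apply ih _ (fun y hy => hl y (by simp [hy]))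
    have hx : 0 ≤ x := hl x (by simp)
    unfold dstepB
    dsimp only
    split
    · exact hst
    · split <;> simpa using hx

-- the two dealer loops stay in lockstep: B carries earning of A's dealer list
theorem dealer_agree (deck : List Int) (j p : Int) (hj : 0 ≤ j) (hp : 2 ≤ p) :
    ∀ (k : Nat) (c : Int), 2 ≤ c → ((deck.length : Int) - j - p - c).toNat = k →
    ∀ (dealer : List Int) (d0 : Int),
      (PySem.List.pyRange c ((deck.length : Int) - j - p) 1).foldl (dstepB deck j p)
          (earning dealer, d0, false) =
        (earning ((PySem.List.pyRange c ((deck.length : Int) - j - p) 1).foldl (dstepA deck j p)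
            (dealer, d0, false)).1,
         ((PySem.List.pyRange c ((deck.length : Int) - j - p) 1).foldl (dstepA deck j p)
            (dealer, d0, false)).2) := by
  intro k
  induction k with
  | zero =>
    intro c hc h0 dealer d0
    rw [PySem.List.pyRange_one_eq_nil (by omega)]
    rfl
  | succ k ih =>
    intro c hc h0 dealer d0
    have hlt : c < (deck.length : Int) - j - p := by omega
    rw [PySem.List.pyRange_one_cons hlt]
    simp only [List.foldl_cons]
    have hde : (PySem.List.pyRange (j + p + 2) (j + p + c) 1).foldl
        (fun t k => addCard t (getCard deck k)) (earning dealer)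
        = earning (dealer ++ PySem.List.slice deck (some (j + p + 2)) (some (j + p + c))) := by
      rw [earning_append,
          slice_eq_map deck (j + p + 2) (j + p + c) (by omega) (by omega) (by omega),
          List.foldl_map]
    have hifA : (if 0 < (PySem.List.slice deck (some (j + p + 2)) (some (j + p + c))).length
                 then dealer ++ PySem.List.slice deck (some (j + p + 2)) (some (j + p + c))
                 else dealer)
        = dealer ++ PySem.List.slice deck (some (j + p + 2)) (some (j + p + c)) := by
      split
      · rfl
      · have hnil : PySem.List.slice deck (some (j + p + 2)) (some (j + p + c)) = [] := by
          apply List.eq_nil_of_length_eq_zero; omega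
        simp [hnil]
    rw [show dstepB deck j p (earning dealer, d0, false) c
          = (if earning (dealer ++ PySem.List.slice deck (some (j + p + 2)) (some (j + p + c))) ≥ 17
             then (earning (dealer ++ PySem.List.slice deck (some (j + p + 2)) (some (j + p + c))), c, true)
             else (earning (dealer ++ PySem.List.slice deck (some (j + p + 2)) (some (j + p + c))), c, false))
        by unfold dstepB; dsimp only; rw [if_neg (by simp), hde]]
    rw [show dstepA deck j p (dealer, d0, false) c
          = (if earning (dealer ++ PySem.List.slice deck (some (j + p + 2)) (some (j + p + c))) ≥ 17
             then (dealer ++ PySem.List.slice deck (some (j + p + 2)) (some (j + p + c)), c, true)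
             else (dealer ++ PySem.List.slice deck (some (j + p + 2)) (some (j + p + c)), c, false))
        by unfold dstepA; dsimp only; rw [if_neg (by simp), hifA]]
    by_cases hbr : earning (dealer ++ PySem.List.slice deck (some (j + p + 2)) (some (j + p + c))) ≥ 17
    · rw [if_pos hbr, if_pos hbr,
          foldl_frozen_dstepB deck j p _ _ rfl, foldl_frozen_dstepA deck j p _ _ rfl]
    · rw [if_neg hbr, if_neg hbr]
      exact ih (c + 1) (by omega) (by omega)
        (dealer ++ PySem.List.slice deck (some (j + p + 2)) (some (j + p + c))) c

-- the two p-loops produce the same options list (given handT as B's incoming total)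
theorem row_loop (deck : List Int) (j : Int) (hj : 0 ≤ j) :
    ∀ (k : Nat) (a : Int), 2 ≤ a → ((deck.length : Int) - j - 1 - a).toNat = k →
    ∀ (opts : List Int),
      ((PySem.List.pyRange a ((deck.length : Int) - j - 1) 1).foldl
        (ostepB deck (fun x => BJ deck x) j) (opts, handT deck j (max 2 (a - 1)), false)).1 =
      ((PySem.List.pyRange a ((deck.length : Int) - j - 1) 1).foldl (stepAf deck j (fun x => BJ deck x))
        (opts, false)).1 := by
  intro k
  induction k with
  | zero =>
    intro a ha h0 opts
    rw [PySem.List.pyRange_one_eq_nil (by omega)]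
    rfl
  | succ k ih =>
    intro a ha h0 opts
    have hlt : a < (deck.length : Int) - j - 1 := by omega
    rw [PySem.List.pyRange_one_cons hlt]
    simp only [List.foldl_cons]
    -- B's updated hand total is handT deck j a
    have hh : (if 2 < a then addCard (handT deck j (max 2 (a - 1))) (getCard deck (j + a + 1))
               else handT deck j (max 2 (a - 1))) = handT deck j a := by
      by_cases h2 : 2 < a
      · rw [if_pos h2, show max 2 (a - 1) = a - 1 by omega, ← handT_succ deck j a (by omega)]
      · rw [if_neg h2, show a = 2 by omega]
        norm_num
    -- A's hand earning is handT deck j a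
    have hhand := handT_eq_earning deck j a hj ha (by omega)
    by_cases hbust : handT deck j a > 21
    · -- both append the bust option and break
      rw [show ostepB deck (fun x => BJ deck x) j (opts, handT deck j (max 2 (a - 1)), false) a
            = (opts ++ [-1 + BJ deck (j + a + 2)], handT deck j a, true) by
          unfold ostepB; dsimp only; rw [if_neg (by simp), hh, if_pos hbust]]
      rw [show stepAf deck j (fun x => BJ deck x) (opts, false) a
            = (opts ++ [-1 + BJ deck (j + a + 2)], true) by
          unfold stepAf; dsimp only; rw [if_neg (by simp), ← hhand, if_pos hbust]]
      rw [foldl_frozen_ostepB deck _ j _ _ rfl, foldl_frozen_stepAf deck j _ _ _ rfl]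
    · -- both take the dealer path
      have hdeal := dealer_agree deck j a hj ha ((deck.length : Int) - j - a - 2).toNat 2
        (le_refl 2) rfl (deal deck (j + 1)) 0
      rw [earning_deal deck (j + 1), show (j + 1) + 1 = j + 2 by ring] at hdeal
      set ra := (PySem.List.pyRange 2 ((deck.length : Int) - j - a) 1).foldl (dstepA deck j a)
        (deal deck (j + 1), 0, false) with hra
      have hEdeal : earning (if earning ra.1 > 21 then ([] : List Int) else ra.1)
          = (if earning ra.1 > 21 then 0 else earning ra.1) := by
        split <;> rfl
      rw [show ostepB deck (fun x => BJ deck x) j (opts, handT deck j (max 2 (a - 1)), false) a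
            = (opts ++ [(if handT deck j a > (if earning ra.1 > 21 then 0 else earning ra.1) then 1
                else if (if earning ra.1 > 21 then 0 else earning ra.1) > handT deck j a then -1
                else 0) + BJ deck (j + a + ra.2.1)], handT deck j a, false) by
          unfold ostepB
          dsimp only
          rw [if_neg (by simp), hh, if_neg (by omega), PySem.List.len_eq, hdeal]]
      rw [show stepAf deck j (fun x => BJ deck x) (opts, false) a
            = (opts ++ [(if handT deck j a > (if earning ra.1 > 21 then 0 else earning ra.1) then 1
                else if (if earning ra.1 > 21 then 0 else earning ra.1) > handT deck j a then -1
                else 0) + BJ deck (j + a + ra.2.1)], false) by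
          unfold stepAf
          dsimp only
          rw [if_neg (by simp), ← hhand, if_neg (by omega), dealerRun_eq, PySem.List.len_eq, ← hra,
              pyCompare, hEdeal]]
      have := ih (a + 1) (by omega) (by omega)
        (opts ++ [(if handT deck j a > (if earning ra.1 > 21 then 0 else earning ra.1) then 1
          else if (if earning ra.1 > 21 then 0 else earning ra.1) > handT deck j a then -1
          else 0) + BJ deck (j + a + ra.2.1)])
      rw [show max 2 (a + 1 - 1) = a by omega] at this
      exact this

theorem BJ_eq_rowBJ (deck : List Int) (j : Int) (hj : 0 ≤ j)
    (h4 : 4 ≤ (deck.length : Int) - j) :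
    BJ deck j = rowBJ deck (fun k => BJ deck k) j := by
  rw [BJ_unfold deck j (by simp only [PySem.List.len_eq]; omega), rowBJ_eq]
  congr 1
  congr 1
  have := row_loop deck j hj ((deck.length : Int) - j - 1 - 2).toNat 2 (le_refl 2) rfl []
  rw [show max 2 (2 - 1 : Int) = 2 by norm_num, handT_two] at this
  simp only [PySem.List.len_eq]
  exact this.symm

theorem rowBJ_congr (deck : List Int) (f g : Int → Int) (j : Int)
    (hfg : ∀ k, j < k → f k = g k) : rowBJ deck f j = rowBJ deck g j := by
  rw [rowBJ_eq, rowBJ_eq]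
  have hstep : ∀ p ∈ PySem.List.pyRange 2 (PySem.List.len deck - j - 1) 1,
      ∀ (st : List Int × Int × Bool), ostepB deck f j st p = ostepB deck g j st p := by
    intro p hp st
    have hpb := (PySem.List.mem_pyRange_one).1 hp
    unfold ostepB
    dsimp only
    by_cases hfr : st.2.2
    · rw [if_pos hfr, if_pos hfr]
    · rw [if_neg hfr, if_neg hfr]
      set h := if 2 < p then addCard st.2.1 (getCard deck (j + p + 1)) else st.2.1 with hh
      by_cases hbust : h > 21
      · rw [if_pos hbust, if_pos hbust, hfg (j + p + 2) (by omega)]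
      · rw [if_neg hbust, if_neg hbust]
        set dst := (PySem.List.pyRange 2 (PySem.List.len deck - j - p) 1).foldl (dstepB deck j p)
          (addCard (addCard 0 (PySem.Int.mod (getCard deck (j + 1)) 13))
            (PySem.Int.mod (getCard deck (j + 2)) 13), 0, false) with hdst
        have hd0 : 0 ≤ dst.2.1 := by
          rw [hdst]
          apply dstepB_d_nonneg
          · intro x hx
            have := (PySem.List.mem_pyRange_one).1 hx
            omega
          · simp
        rw [hfg (j + p + dst.2.1) (by omega)]
  rw [PySem.List.foldl_congr_mem' _ _ _ _ hstep]

-- the memo fold fills the table with BJ's values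
theorem memo_inv (deck : List Int) (i : Int) (hi : 0 ≤ i) :
    ∀ (k : Nat) (a : Int), i - 1 ≤ a → a ≤ (deck.length : Int) - 4 → (a - (i - 1)).toNat = k →
    ∀ (m : PySem.Dict Int Int), (∀ x, a < x → m.getD x 0 = BJ deck x) →
    ∀ x, i - 1 < x →
      ((PySem.List.pyRange a (i - 1) (-1)).foldl
        (fun (m : PySem.Dict Int Int) j => m.insert j (rowBJ deck (fun k => m.getD k 0) j)) m).getD x 0
      = BJ deck x := by
  intro k
  induction k with
  | zero =>
    intro a ha1 ha2 h0 m hm x hx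
    rw [PySem.List.pyRange_neg_one_eq_nil (by omega)]
    exact hm x (by omega)
  | succ k ih =>
    intro a ha1 ha2 h0 m hm x hx
    have hlt : i - 1 < a := by omega
    rw [PySem.List.pyRange_neg_one_cons hlt]
    simp only [List.foldl_cons]
    apply ih (a - 1) (by omega) (by omega) (by omega) _ _ x hx
    intro y hy
    by_cases hya : y = a
    · subst hya
      rw [PySem.Dict.getD_insert_self _]
      rw [rowBJ_congr deck (fun k => m.getD k 0) (fun k => BJ deck k) y (fun k hk => hm k hk)]
      exact (BJ_eq_rowBJ deck y (by omega) (by omega)).symm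
    · rw [PySem.Dict.getD_insert_of_ne _ _ _ hya]
      exact hm y (by omega)

-- BJ is 0 past the table
theorem BJ_of_short (deck : List Int) (x : Int) (h : PySem.List.len deck - x < 4) :
    BJ deck x = 0 := by
  show BJ_go deck (PySem.List.len deck - x).toNat x = 0
  cases hn : (PySem.List.len deck - x).toNat with
  | zero => rfl
  | succ n => rw [BJ_go_succ, if_pos h]

-- ===== VERDICT (by name: the statement is the Claim_ definition above) =====
theorem BJ_spec : Claim_equal_BJ := by
  unfold Claim_equal_BJ
  intro deck i _ hi
  unfold Spec_BJ BJ_alt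
  by_cases hg : PySem.List.len deck - i < 4
  · rw [if_pos hg]
    exact BJ_of_short deck i hg
  · rw [if_neg hg]
    have hi0 : 0 ≤ i := hi
    have hmain := memo_inv deck i hi0 ((PySem.List.len deck - 4) - (i - 1)).toNat
      (PySem.List.len deck - 4) (by simp only [PySem.List.len_eq] at *; omega)
      (by simp only [PySem.List.len_eq]; omega)
      (by simp only [PySem.List.len_eq]) PySem.Dict.empty
      (by
        intro x hxb
        rw [show (PySem.Dict.empty : PySem.Dict Int Int).getD x 0 = 0 by simp [PySem.Dict.getD_empty]]
        exact (BJ_of_short deck x (by simp only [PySem.List.len_eq] at *; omega)).symm)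
      i (by omega)
    rw [← PySem.Dict.getD_eq_get?_getD]
    simp only [PySem.List.len_eq] at hmain ⊢
    exact hmain.symm
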